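-- pv_equiv track=rewrite | github.com/wangsailing1/demo | lib/sdk_platform/helper/utils.py | trans_int2byte
-- ===== SOURCE A (Python) =====
-- def trans_int2byte(num, length=256):
--     """把一个长整形转换成字节串
--     Args:
--         num: 长整数
--     Returns:
--         字节串
--     """
--     bits = []
--     while num > 0:
--         num, asc = divmod(num, length)
--         bit = chr(asc)
--         bits.append(bit)
--
--     reverse_bits = reversed(bits)
--     return ''.join(reverse_bits)
-- ===== SOURCE B (Python) =====
-- def trans_int2byte(num, length=256):
--     if num <= 0:
--         return ''
--     p = 1
--     while p * length <= num:
--         p *= length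
--     chars = []
--     while p >= 1:
--         d, num = divmod(num, p)
--         chars.append(chr(d))
--         p //= length
--     return ''.join(chars)
-- ===== Notes on version B (the rewrite author's own statement) =====
-- stated objective: alternative
-- what changed: B extracts digits most-significant-first by first finding the largest power of the base not exceeding num and then dividing downward, instead of A's LSB-first divmod loop followed by a reverse.
-- outside the precondition, e.g. on trans_int2byte(6, -3): A returns '\x00', B returns ''; on trans_int2byte(300005, 100000): A returns '\x03\x05', B returns '\x03\x05'; on trans_int2byte(5, -3): A raises ValueError, B returns ''
import Mathlib
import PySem

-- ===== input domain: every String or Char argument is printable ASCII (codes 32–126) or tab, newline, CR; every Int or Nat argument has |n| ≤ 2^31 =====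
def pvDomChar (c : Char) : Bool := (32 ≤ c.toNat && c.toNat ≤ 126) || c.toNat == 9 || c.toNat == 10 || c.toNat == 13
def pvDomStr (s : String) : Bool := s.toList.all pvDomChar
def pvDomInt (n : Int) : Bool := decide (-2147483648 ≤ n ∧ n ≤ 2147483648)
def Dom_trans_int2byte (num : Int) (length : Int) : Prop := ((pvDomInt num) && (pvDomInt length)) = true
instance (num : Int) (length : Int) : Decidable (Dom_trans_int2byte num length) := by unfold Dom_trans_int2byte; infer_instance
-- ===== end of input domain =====

-- B converts the integer to its base-`length` digit string most-significant-digit first (largest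
-- power of the base first, then divide downward), instead of A's LSB-first divmod loop + reverse.

-- ===== PORT A =====
-- `while num > 0: num, asc = divmod(num, length); bits.append(chr(asc))`, fueled; fuel
-- num.natAbs + 1 is enough on Pre_ (the digit count is at most num).  chr(asc) is ported as
-- Char.ofNat asc.toNat, exact for 0 ≤ asc < 0xD800, which Pre_ guarantees.
def pvALoop (fuel : Nat) (num : Int) (length : Int) (bits : List Char) : List Char :=
  match fuel with
  | 0 => bits
  | f + 1 =>
    if num > 0 then
      pvALoop f (PySem.Int.floordiv num length) length
        (bits ++ [Char.ofNat (PySem.Int.mod num length).toNat])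
    else bits

def trans_int2byte (num : Int) (length : Int) : String :=
  String.mk ((pvALoop (num.natAbs + 1) num length []).reverse)

-- ===== PORT B =====
-- `p = 1; while p * length <= num: p *= length` (fueled; enough fuel on Pre_)
def pvBPow (fuel : Nat) (p : Int) (length : Int) (num : Int) : Int :=
  match fuel with
  | 0 => p
  | f + 1 => if p * length ≤ num then pvBPow f (p * length) length num else p

-- `while p >= 1: d, num = divmod(num, p); chars.append(chr(d)); p //= length`
def pvBDigits (fuel : Nat) (num : Int) (p : Int) (length : Int) (acc : List Char) : List Char :=
  match fuel with
  | 0 => acc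
  | f + 1 =>
    if p ≥ 1 then
      pvBDigits f (PySem.Int.mod num p) (PySem.Int.floordiv p length) length
        (acc ++ [Char.ofNat (PySem.Int.floordiv num p).toNat])
    else acc

def trans_int2byte_alt (num : Int) (length : Int) : String :=
  if num ≤ 0 then ""
  else
    String.mk (pvBDigits (num.natAbs + 1) num (pvBPow (num.natAbs + 1) 1 length num) length [])

-- ===== PRECONDITION & SPEC =====
-- Pre_ excludes only inputs with num > 0 and a base outside 2..55296 (unless num itself is ≤ 55295):
-- there A raises ZeroDivisionError (length = 0), loops forever (length = 1), raises ValueError on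
-- chr of a negative or too-large digit, returns an accidental '\x00' for a negative base dividing
-- num (a corner no caller would specify, where B's '' is equally defensible), or returns a string
-- containing surrogate code points that a Lean String cannot represent.  When num < length
-- the single digit is num itself, so any valid non-surrogate code point is admitted too.
def Pre_trans_int2byte (num : Int) (length : Int) : Prop :=
  num ≤ 0 ∨ (2 ≤ length ∧ (length ≤ 55296 ∨ num ≤ 55295 ∨
    (num < length ∧ num ≤ 1114111 ∧ ¬(55296 ≤ num ∧ num ≤ 57343))))
instance (num : Int) (length : Int) : Decidable (Pre_trans_int2byte num length) := by
  unfold Pre_trans_int2byte; infer_instance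

def pvWitness_trans_int2byte : Int × Int := (65792, 256)

def Spec_trans_int2byte (num : Int) (length : Int) (out : String) : Prop := out = trans_int2byte_alt num length
instance (num : Int) (length : Int) (out : String) : Decidable (Spec_trans_int2byte num length out) := by unfold Spec_trans_int2byte; infer_instance

-- ===== CLAIM (what is proved, stated in full; the proofs are below) =====
def Claim_equal_trans_int2byte : Prop := ∀ (num : Int) (length : Int), Dom_trans_int2byte num length → Pre_trans_int2byte num length → Spec_trans_int2byte num length (trans_int2byte num length)

-- ===== LEMMAS AND PROOFS =====

-- Nat-level model of B's digit loop: MSB-first digits of n, starting divisor p, base l.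
def pvMsb (l : Nat) (p : Nat) (n : Nat) : List Nat :=
  if h : p = 0 ∨ l < 2 then [] else (n / p) :: pvMsb l (p / l) (n % p)
  termination_by p
  decreasing_by
    rcases not_or.mp h with ⟨h1, h2⟩
    exact Nat.div_lt_self (Nat.pos_of_ne_zero h1) (by omega)

theorem pvMsb_zero (l n : Nat) : pvMsb l 0 n = [] := by
  rw [pvMsb]; simp

theorem pvMsb_pos (l p n : Nat) (hl : 2 ≤ l) (hp : p ≠ 0) :
    pvMsb l p n = (n / p) :: pvMsb l (p / l) (n % p) := by
  rw [pvMsb]; simp [hp, Nat.not_lt.mpr hl]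

theorem pvMsb_one (l n : Nat) (hl : 2 ≤ l) : pvMsb l 1 n = [n] := by
  rw [pvMsb_pos l 1 n hl (by omega), Nat.div_one, Nat.div_eq_of_lt (by omega : 1 < l)]
  simp [pvMsb_zero]

-- peeling the least-significant digit off the MSB-first list
theorem pvMsb_shift (l : Nat) (hl : 2 ≤ l) :
    ∀ (k n : Nat), pvMsb l (l ^ (k + 1)) n = pvMsb l (l ^ k) (n / l) ++ [n % l] := by
  intro k
  induction k with
  | zero =>
    intro n
    rw [pow_one, pow_zero, pvMsb_pos l l n hl (by omega), Nat.div_self (by omega),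
      pvMsb_one l _ hl, pvMsb_one l _ hl]
    simp
  | succ k ih =>
    intro n
    have hpow : l ^ (k + 1 + 1) / l = l ^ (k + 1) := by
      rw [pow_succ' l (k + 1)]
      exact Nat.mul_div_cancel_left _ (by omega)
    have hne : l ^ (k + 1 + 1) ≠ 0 := pow_ne_zero _ (by omega)
    have hne' : l ^ (k + 1) ≠ 0 := pow_ne_zero _ (by omega)
    have hpow2 : l ^ (k + 1) / l = l ^ k := by
      rw [pow_succ' l k]
      exact Nat.mul_div_cancel_left _ (by omega)
    rw [pvMsb_pos l (l ^ (k + 1 + 1)) n hl hne, hpow, ih (n % l ^ (k + 1 + 1)),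
      pvMsb_pos l (l ^ (k + 1)) (n / l) hl hne', hpow2]
    have e1 : n % l ^ (k + 1 + 1) / l = n / l % l ^ (k + 1) := by
      rw [pow_succ' l (k + 1)]
      exact Nat.mod_mul_right_div_self n l (l ^ (k + 1))
    have e2 : n % l ^ (k + 1 + 1) % l = n % l :=
      Nat.mod_mod_of_dvd n (dvd_pow_self l (by omega))
    have e3 : n / l ^ (k + 1 + 1) = n / l / l ^ (k + 1) := by
      rw [Nat.div_div_eq_div_mul, ← pow_succ' l (k + 1)]
    rw [e1, e2, e3]
    simp

theorem main_digits (l : Nat) (hl : 2 ≤ l) :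
    ∀ (k n : Nat), l ^ k ≤ n → n < l ^ (k + 1) →
      (Nat.digits l n).reverse = pvMsb l (l ^ k) n := by
  intro k
  induction k with
  | zero =>
    intro n h1 h2
    rw [pow_zero] at h1; rw [pow_one] at h2
    rw [Nat.digits_def' (by omega : 1 < l) (by omega : 0 < n),
      Nat.div_eq_of_lt h2, Nat.digits_zero, Nat.mod_eq_of_lt h2]
    rw [pow_zero, pvMsb_one l n hl]
    simp
  | succ k ih =>
    intro n h1 h2
    have hn : 0 < n := lt_of_lt_of_le (Nat.pow_pos (by omega)) h1
    rw [Nat.digits_def' (by omega : 1 < l) hn, pvMsb_shift l hl k n]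
    have ha : l ^ k ≤ n / l := by
      rw [Nat.le_div_iff_mul_le (by omega : 0 < l), ← pow_succ]
      exact h1
    have hb : n / l < l ^ (k + 1) := by
      rw [Nat.div_lt_iff_lt_mul (by omega : 0 < l), ← pow_succ]
      exact h2
    rw [List.reverse_cons, ih (n / l) ha hb]

-- A's fueled loop computes (map Char.ofNat) of Nat.digits, appended to the accumulator.
theorem pvALoop_eq (l : Nat) (hl : 2 ≤ l) :
    ∀ (f n : Nat) (bits : List Char), (Nat.digits l n).length ≤ f →
      pvALoop f (n : Int) (l : Int) bits = bits ++ (Nat.digits l n).map Char.ofNat := by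
  intro f
  induction f with
  | zero =>
    intro n bits hf
    have hnil : Nat.digits l n = [] := List.length_eq_zero_iff.mp (Nat.le_zero.mp hf)
    have hn0 : n = 0 := Nat.digits_eq_nil_iff_eq_zero.mp hnil
    subst hn0
    simp [pvALoop]
  | succ f ih =>
    intro n bits hf
    by_cases hn : 0 < n
    · have hgt : ((n : Int) > 0) := by exact_mod_cast hn
      have hlen : (Nat.digits l (n / l)).length ≤ f := by
        rw [Nat.digits_def' (by omega : 1 < l) hn] at hf
        simpa using hf
      have e1 : PySem.Int.floordiv (n : Int) (l : Int) = ((n / l : Nat) : Int) :=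
        PySem.Int.floordiv_natCast n l
      have e2 : (PySem.Int.mod (n : Int) (l : Int)).toNat = n % l := by
        rw [PySem.Int.mod_natCast]; exact Int.toNat_natCast _
      rw [pvALoop, if_pos hgt, e1, e2, ih (n / l) _ hlen,
        Nat.digits_def' (by omega : 1 < l) hn]
      simp
    · have h0 : n = 0 := by omega
      subst h0
      simp [pvALoop]

-- B's power loop returns the largest power of the base not exceeding num.
theorem pvBPow_eq (l n : Nat) (hl : 2 ≤ l) :
    ∀ (f j : Nat), l ^ j ≤ n → n + 1 ≤ f + l ^ j →
      pvBPow f ((l ^ j : Nat) : Int) (l : Int) (n : Int) = ((l ^ (Nat.log l n) : Nat) : Int) := by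
  intro f
  induction f with
  | zero => intro j hj hf; omega
  | succ f ih =>
    intro j hj hf
    rw [pvBPow]
    by_cases hc : l ^ (j + 1) ≤ n
    · have : ((l ^ j : Nat) : Int) * (l : Int) ≤ (n : Int) := by
        push_cast [← pow_succ] at hc ⊢
        exact_mod_cast hc
      rw [if_pos this]
      have hcast : ((l ^ j : Nat) : Int) * (l : Int) = ((l ^ (j + 1) : Nat) : Int) := by
        push_cast [pow_succ]; ring
      rw [hcast]
      apply ih (j + 1) hc
      have h1 : l ^ j + 1 ≤ l ^ (j + 1) := by
        have := Nat.one_le_two_pow (n := j)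
        have h2 : 2 * l ^ j ≤ l * l ^ j := Nat.mul_le_mul_right _ hl
        have h3 : 1 ≤ l ^ j := Nat.one_le_pow _ _ (by omega)
        rw [pow_succ, mul_comm]
        omega
      omega
    · have : ¬ ((l ^ j : Nat) : Int) * (l : Int) ≤ (n : Int) := by
        push_cast [← pow_succ]
        exact_mod_cast hc
      rw [if_neg this]
      congr 2
      exact (Nat.log_eq_of_pow_le_of_lt_pow hj (by omega)).symm
-- B's digit loop computes (map Char.ofNat) of pvMsb, appended to the accumulator.
theorem pvBDigits_zero (f : Nat) (num l : Int) (acc : List Char) :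
    pvBDigits f num 0 l acc = acc := by
  cases f <;> simp [pvBDigits]

theorem pvBDigits_eq (l : Nat) (hl : 2 ≤ l) :
    ∀ (k f n : Nat) (acc : List Char), k + 1 ≤ f →
      pvBDigits f (n : Int) ((l ^ k : Nat) : Int) (l : Int) acc
        = acc ++ (pvMsb l (l ^ k) n).map Char.ofNat := by
  intro k
  induction k with
  | zero =>
    intro f n acc hf
    obtain ⟨f', rfl⟩ : ∃ f', f = f' + 1 := ⟨f - 1, by omega⟩
    rw [pvBDigits, pow_zero, Nat.cast_one]
    rw [if_pos (by omega : (1 : Int) ≥ 1)]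
    have hd : PySem.Int.floordiv (1 : Int) (l : Int) = 0 := by
      have := PySem.Int.floordiv_natCast 1 l
      rw [Nat.div_eq_of_lt (by omega : 1 < l)] at this
      exact_mod_cast this
    have hdn : PySem.Int.floordiv (n : Int) 1 = (n : Int) := by
      have := PySem.Int.floordiv_natCast n 1
      simpa using this
    rw [hd, hdn, pvBDigits_zero, pvMsb_one l n hl]
    simp
  | succ k ih =>
    intro f n acc hf
    obtain ⟨f', rfl⟩ : ∃ f', f = f' + 1 := ⟨f - 1, by omega⟩
    have hpos : 0 < l ^ (k + 1) := Nat.pow_pos (by omega)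
    rw [pvBDigits, if_pos (by exact_mod_cast hpos : ((l ^ (k + 1) : Nat) : Int) ≥ 1)]
    have hpow2 : l ^ (k + 1) / l = l ^ k := by
      rw [pow_succ' l k]; exact Nat.mul_div_cancel_left _ (by omega)
    have e1 : PySem.Int.mod (n : Int) ((l ^ (k + 1) : Nat) : Int)
        = ((n % l ^ (k + 1) : Nat) : Int) := PySem.Int.mod_natCast n _
    have e2 : PySem.Int.floordiv ((l ^ (k + 1) : Nat) : Int) (l : Int)
        = ((l ^ k : Nat) : Int) := by
      rw [PySem.Int.floordiv_natCast, hpow2]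
    have e3 : (PySem.Int.floordiv (n : Int) ((l ^ (k + 1) : Nat) : Int)).toNat
        = n / l ^ (k + 1) := by
      rw [PySem.Int.floordiv_natCast]; exact Int.toNat_natCast _
    rw [e1, e2, e3, ih f' (n % l ^ (k + 1)) _ (by omega),
      pvMsb_pos l (l ^ (k + 1)) n hl (by omega), hpow2]
    simp

-- fuel bound: the number of digits of n (= log + 1) is at most n
theorem digits_len_le (l n : Nat) (hl : 2 ≤ l) (hn : 0 < n) :
    (Nat.digits l n).length ≤ n := by
  rw [Nat.length_digits l n (by omega) (by omega)]
  have := Nat.log_lt_self l (x := n) (by omega)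
  omega

theorem trans_int2byte_spec : Claim_equal_trans_int2byte := by
  intro num length _ hpre
  unfold Spec_trans_int2byte trans_int2byte trans_int2byte_alt
  by_cases hn : num ≤ 0
  · rw [if_pos hn]
    have : pvALoop (num.natAbs + 1) num length [] = [] := by
      rw [pvALoop, if_neg (by omega)]
    rw [this]
    rfl
  · rw [if_neg hn]
    have hl2 : 2 ≤ length := by
      rcases hpre with h | ⟨h, _⟩
      · omega
      · exact h
    obtain ⟨n, rfl⟩ : ∃ n : Nat, num = (n : Int) :=
      ⟨num.toNat, (Int.toNat_of_nonneg (by omega)).symm⟩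
    obtain ⟨l, rfl⟩ : ∃ l : Nat, length = (l : Int) :=
      ⟨length.toNat, (Int.toNat_of_nonneg (by omega)).symm⟩
    have hl : 2 ≤ l := by exact_mod_cast hl2
    have hnn : 0 < n := by exact_mod_cast (by omega : (0 : Int) < (n : Int))
    have hna : (n : Int).natAbs = n := Int.natAbs_natCast n
    set k := Nat.log l n with hk
    have hk1 : l ^ k ≤ n := Nat.pow_log_le_self l (by omega)
    have hk2 : n < l ^ (k + 1) := Nat.lt_pow_succ_log_self (by omega) n
    have hklen : k + 1 = (Nat.digits l n).length :=
      (Nat.length_digits l n (by omega) (by omega)).symm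
    -- A side
    rw [hna, pvALoop_eq l hl (n + 1) n [] (le_trans (digits_len_le l n hl hnn) (by omega))]
    -- B side: power loop
    have hbp : pvBPow (n + 1) 1 (l : Int) (n : Int) = ((l ^ k : Nat) : Int) := by
      have := pvBPow_eq l n hl (n + 1) 0 (by simpa using hnn) (by simp)
      simpa using this
    rw [hbp, pvBDigits_eq l hl k (n + 1) n []
      (by have : k ≤ (Nat.digits l n).length - 1 := by omega
          have := digits_len_le l n hl hnn
          omega)]
    -- digits equality
    rw [List.nil_append, List.nil_append, ← List.map_reverse,
      main_digits l hl k n hk1 hk2]
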